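-- pv_equiv track=rewrite | github.com/eidetic-works/nucleus-mcp | scripts/observability/_common.py | taxonomy_lane_keywords
-- ===== SOURCE A (Python) =====
-- from typing import Any, Iterator
--
-- def taxonomy_lane_keywords(taxonomy: dict[str, dict[str, Any]]) -> dict[str, set[str]]:
--     """Derive agent-exclusive tag set per agent for cross-talk detection.
--
--     A tag counts as a lane-keyword for agent X iff it appears under EXACTLY ONE
--     agent's permitted_tags. Tags shared across multiple agents are dropped — they
--     are shared vocabulary, not lane signals.
--
--     Replaces the hard-coded LANE_KEYWORDS table in cross_trio_dashboard.cross_talk_rate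
--     so taxonomy edits flow through without code changes.
--     """
--     tag_owners: dict[str, set[str]] = {}
--     for agent, charter in taxonomy.items():
--         for tag in charter.get("permitted_tags", []) or []:
--             tag_owners.setdefault(tag, set()).add(agent)
--     exclusive: dict[str, set[str]] = {agent: set() for agent in taxonomy}
--     for tag, owners in tag_owners.items():
--         if len(owners) == 1:
--             (only,) = owners
--             exclusive[only].add(tag)
--     return exclusive
-- ===== SOURCE B (Python) =====
-- from typing import Any
--
-- def taxonomy_lane_keywords(taxonomy: dict[str, dict[str, Any]]) -> dict[str, set[str]]:
--     """Count, per tag, how many distinct agents list it; a tag is a lane keyword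
--     for an agent iff its count is exactly 1."""
--     counts: dict[str, int] = {}
--     for charter in taxonomy.values():
--         for tag in set(charter.get("permitted_tags") or []):
--             counts[tag] = counts.get(tag, 0) + 1
--     return {
--         agent: {tag for tag in (charter.get("permitted_tags") or []) if counts[tag] == 1}
--         for agent, charter in taxonomy.items()
--     }
-- ===== Notes on version B (the rewrite author's own statement) =====
-- stated objective: alternative
-- what changed: B replaces A's tag->owner-set inversion (build owner sets per tag, then scatter singleton-owned tags back) by a tag->distinct-agent-count table built in one pass, then derives each agent's exclusive set by scanning that agent's own tag list and keeping tags whose count is 1.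
import Mathlib
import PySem

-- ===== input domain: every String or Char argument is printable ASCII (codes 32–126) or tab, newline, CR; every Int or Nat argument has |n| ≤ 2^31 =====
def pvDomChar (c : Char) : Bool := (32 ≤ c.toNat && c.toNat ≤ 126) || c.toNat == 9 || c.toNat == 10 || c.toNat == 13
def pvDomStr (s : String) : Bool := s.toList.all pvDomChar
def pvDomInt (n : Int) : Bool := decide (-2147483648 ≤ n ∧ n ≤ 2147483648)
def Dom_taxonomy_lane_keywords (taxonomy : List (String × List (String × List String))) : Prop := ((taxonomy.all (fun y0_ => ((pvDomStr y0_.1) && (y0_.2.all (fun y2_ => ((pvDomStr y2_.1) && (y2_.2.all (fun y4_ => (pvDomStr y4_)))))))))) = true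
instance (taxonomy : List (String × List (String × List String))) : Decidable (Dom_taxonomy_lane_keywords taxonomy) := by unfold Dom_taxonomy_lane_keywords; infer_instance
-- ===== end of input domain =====

-- B replaces A's tag→owner-set inversion by a tag→distinct-agent count table and builds each
-- agent's exclusive set by scanning that agent's own tags (objective: alternative decomposition).

-- ===== PORT A =====
-- charter.get("permitted_tags", []) or []
def aTags (charter : List (String × List String)) : List String :=
  let t := PySem.Dict.getD (PySem.Dict.mk charter) "permitted_tags" []
  if t = [] then [] else t

def taxonomy_lane_keywords (taxonomy : List (String × List (String × List String))) : List (String × List String) :=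
  -- tag_owners: for agent, charter in taxonomy.items(): for tag …: tag_owners.setdefault(tag, set()).add(agent)
  let tag_owners : PySem.Dict String (PySem.Set String) :=
    taxonomy.foldl
      (fun d ac => (aTags ac.2).foldl
        (fun d tag => d.modify tag PySem.Set.empty (fun s => PySem.Set.add s ac.1)) d)
      PySem.Dict.empty
  -- exclusive = {agent: set() for agent in taxonomy}
  let exclusive0 : PySem.Dict String (PySem.Set String) :=
    taxonomy.foldl (fun d ac => d.insert ac.1 PySem.Set.empty) PySem.Dict.empty
  -- for tag, owners in tag_owners.items(): if len(owners) == 1: (only,) = owners; exclusive[only].add(tag)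
  -- '(only,) = owners' reads the sole element of the singleton set: headD; 'exclusive[only].add(tag)'
  -- is modify at a key that is always present (the default is never used).
  let exclusive : PySem.Dict String (PySem.Set String) :=
    tag_owners.items.foldl
      (fun d p =>
        if PySem.Set.len p.2 = 1 then
          d.modify (p.2.headD "") PySem.Set.empty (fun s => PySem.Set.add s p.1)
        else d)
      exclusive0
  exclusive.items

-- ===== PORT B =====
-- charter.get("permitted_tags") or []
def bTags (charter : List (String × List String)) : List String :=
  match PySem.Dict.get? (PySem.Dict.mk charter) "permitted_tags" with
  | some t => if t = [] then [] else t
  | none => []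

def taxonomy_lane_keywords_alt (taxonomy : List (String × List (String × List String))) : List (String × List String) :=
  -- counts[tag] = number of distinct agents listing tag (per-agent dedup via set(...))
  let counts : PySem.Dict String Int :=
    taxonomy.foldl
      (fun d ac => (PySem.Set.ofList (bTags ac.2)).foldl
        (fun d tag => d.insert tag (d.getD tag 0 + 1)) d)
      PySem.Dict.empty
  -- {agent: {tag for tag in … if counts[tag] == 1} for agent, charter in taxonomy.items()}
  -- counts[tag]: the key is always present, so getD's default is never used.
  taxonomy.map (fun ac =>
    (ac.1,
     (bTags ac.2).foldl
       (fun s tag => if counts.getD tag 0 = 1 then PySem.Set.add s tag else s)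
       PySem.Set.empty))

-- ===== PRECONDITION & SPEC =====
-- Pre_: the association list encodes a Python dict, whose keys (agent names) are unique;
-- it excludes no input the Python function can receive.
def Pre_taxonomy_lane_keywords (taxonomy : List (String × List (String × List String))) : Prop :=
  (taxonomy.map Prod.fst).Nodup
instance (taxonomy : List (String × List (String × List String))) : Decidable (Pre_taxonomy_lane_keywords taxonomy) := by unfold Pre_taxonomy_lane_keywords; infer_instance

def pvWitness_taxonomy_lane_keywords : (List (String × List (String × List String))) :=
  [("alpha", [("permitted_tags", ["x", "y"])]), ("beta", [("permitted_tags", ["y", "z"]), ("other", [])])]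

def Spec_taxonomy_lane_keywords (taxonomy : List (String × List (String × List String))) (out : List (String × List String)) : Prop := out = taxonomy_lane_keywords_alt taxonomy
instance (taxonomy : List (String × List (String × List String))) (out : List (String × List String)) : Decidable (Spec_taxonomy_lane_keywords taxonomy out) := by unfold Spec_taxonomy_lane_keywords; infer_instance

-- ===== CLAIM (what is proved, stated in full; the proofs are below) =====
def Claim_equal_taxonomy_lane_keywords : Prop := ∀ (taxonomy : List (String × List (String × List String))), Dom_taxonomy_lane_keywords taxonomy → Pre_taxonomy_lane_keywords taxonomy → Spec_taxonomy_lane_keywords taxonomy (taxonomy_lane_keywords taxonomy)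

-- ===== LEMMAS AND PROOFS =====

-- owners T t: the agents whose permitted tags contain t, in taxonomy order.
def pvOwners (T : List (String × List (String × List String))) (t : String) : List String :=
  (T.filter (fun ac => decide (t ∈ aTags ac.2))).map Prod.fst

-- ocnt T t: how many agents list tag t.
def pvOcnt (T : List (String × List (String × List String))) (t : String) : Nat :=
  T.countP (fun ac => decide (t ∈ aTags ac.2))

lemma bTags_eq (c : List (String × List String)) : bTags c = aTags c := by
  unfold bTags aTags
  rw [PySem.Dict.getD_eq_get?_getD]
  cases h : PySem.Dict.get? (PySem.Dict.mk c) "permitted_tags" <;> simp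

-- A, inner loop: effect of one agent's tag loop on tag_owners.getD t
lemma owners_inner (xs : List String) (ag : String)
    (d : PySem.Dict String (PySem.Set String)) (t : String) :
    ((xs.foldl (fun d tag => d.modify tag PySem.Set.empty (fun s => PySem.Set.add s ag)) d).getD t PySem.Set.empty)
      = if t ∈ xs then (d.getD t PySem.Set.empty).add ag else d.getD t PySem.Set.empty := by
  induction xs generalizing d with
  | nil => simp
  | cons x xs ih =>
    simp only [List.foldl_cons, ih, PySem.Dict.getD_modify, List.mem_cons]
    by_cases hx : t = x
    · subst hx
      by_cases hm : t ∈ xs <;> simp [hm]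
    · by_cases hm : t ∈ xs <;> simp [hm, hx]

-- A, outer loop: tag_owners.getD t accumulates exactly the owners of t
lemma owners_outer (T : List (String × List (String × List String)))
    (d : PySem.Dict String (PySem.Set String)) (t : String) :
    ((T.foldl (fun d ac => (aTags ac.2).foldl
        (fun d tag => d.modify tag PySem.Set.empty (fun s => PySem.Set.add s ac.1)) d) d).getD t PySem.Set.empty)
      = (d.getD t PySem.Set.empty).update (pvOwners T t) := by
  induction T generalizing d with
  | nil => simp [pvOwners, PySem.Set.update_nil]
  | cons ac T ih =>
    simp only [List.foldl_cons, ih, owners_inner]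
    by_cases hm : t ∈ aTags ac.2
    · simp [pvOwners, hm, PySem.Set.update_cons]
    · simp [pvOwners, hm]

lemma owners_keys (T : List (String × List (String × List String)))
    (d : PySem.Dict String (PySem.Set String)) :
    ((T.foldl (fun d ac => (aTags ac.2).foldl
        (fun d tag => d.modify tag PySem.Set.empty (fun s => PySem.Set.add s ac.1)) d) d).keys)
      = PySem.Set.update d.keys (T.flatMap (fun ac => aTags ac.2)) := by
  induction T generalizing d with
  | nil => simp [PySem.Set.update_nil]
  | cons ac T ih =>
    simp only [List.foldl_cons, ih, PySem.Dict.keys_foldl_modify, List.flatMap_cons,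
      PySem.Set.update_append]

-- B, counting loop
lemma counts_outer (T : List (String × List (String × List String)))
    (d : PySem.Dict String Int) (t : String) :
    ((T.foldl (fun d ac => (PySem.Set.ofList (bTags ac.2)).foldl
        (fun d tag => d.insert tag (d.getD tag 0 + 1)) d) d).getD t 0)
      = d.getD t 0 + (pvOcnt T t : Int) := by
  induction T generalizing d with
  | nil => simp [pvOcnt]
  | cons ac T ih =>
    simp only [List.foldl_cons, ih, PySem.Dict.getD_foldl_insert_add_one]
    have hcount : List.count t (PySem.Set.ofList (bTags ac.2))
        = if t ∈ aTags ac.2 then 1 else 0 := by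
      by_cases hm : t ∈ aTags ac.2
      · rw [if_pos hm]
        exact List.count_eq_one_of_mem (PySem.Set.nodup_ofList _)
          (by rw [PySem.Set.mem_ofList, bTags_eq]; exact hm)
      · rw [if_neg hm]
        exact List.count_eq_zero.mpr (by rw [PySem.Set.mem_ofList, bTags_eq]; exact hm)
    rw [hcount]
    unfold pvOcnt
    rw [List.countP_cons]
    by_cases hm : t ∈ aTags ac.2
    · simp [hm]; ring
    · simp [hm]

-- a conditional-add loop is an update with the filtered list
lemma foldl_if_add (xs : List String) (P : String → Prop) [DecidablePred P] (s : PySem.Set String) :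
    xs.foldl (fun s t => if P t then PySem.Set.add s t else s) s
      = s.update (xs.filter (fun t => decide (P t))) := by
  induction xs generalizing s with
  | nil => simp [PySem.Set.update_nil]
  | cons x xs ih =>
    simp only [List.foldl_cons, List.filter_cons]
    by_cases hp : P x <;> simp [hp, ih, PySem.Set.update_cons]

lemma excl0_keys (T : List (String × List (String × List String))) :
    ((T.foldl (fun d ac => d.insert ac.1 PySem.Set.empty) PySem.Dict.empty
        : PySem.Dict String (PySem.Set String)).keys)
      = PySem.Set.ofList (T.map Prod.fst) := by
  rw [PySem.Dict.keys_foldl_insert_key T Prod.fst (fun _ _ => PySem.Set.empty) PySem.Dict.empty]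
  rw [PySem.Dict.keys_empty, PySem.Set.update_nil_left]

lemma excl0_getD (T : List (String × List (String × List String)))
    (d : PySem.Dict String (PySem.Set String)) (a : String)
    (h : d.getD a PySem.Set.empty = PySem.Set.empty) :
    ((T.foldl (fun d ac => d.insert ac.1 PySem.Set.empty) d).getD a PySem.Set.empty)
      = PySem.Set.empty := by
  induction T generalizing d with
  | nil => simpa using h
  | cons ac T ih =>
    simp only [List.foldl_cons]
    refine ih _ ?_
    rw [PySem.Dict.getD_insert]
    split_ifs with hh
    · rfl
    · exact h

-- the final loop of A: per-agent value
lemma final_getD (l : List (String × PySem.Set String))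
    (d : PySem.Dict String (PySem.Set String)) (a : String) :
    ((l.foldl (fun d p =>
        if PySem.Set.len p.2 = 1 then
          d.modify (p.2.headD "") PySem.Set.empty (fun s => PySem.Set.add s p.1)
        else d) d).getD a PySem.Set.empty)
      = (d.getD a PySem.Set.empty).update
          ((l.filter (fun p => decide (PySem.Set.len p.2 = 1 ∧ p.2.headD "" = a))).map Prod.fst) := by
  induction l generalizing d with
  | nil => simp [PySem.Set.update_nil]
  | cons p l ih =>
    simp only [List.foldl_cons, List.filter_cons]
    by_cases h1 : PySem.Set.len p.2 = 1
    · rw [if_pos h1, ih, PySem.Dict.getD_modify]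
      by_cases h2 : p.2.headD "" = a
      · rw [if_pos h2.symm, if_pos (decide_eq_true ⟨h1, h2⟩), List.map_cons,
          PySem.Set.update_cons, h2]
      · rw [if_neg (fun hh => h2 hh.symm),
          if_neg (fun hd => h2 (of_decide_eq_true hd).2)]
    · rw [if_neg h1, ih, if_neg (fun hd => h1 (of_decide_eq_true hd).1)]

-- the final loop of A: keys preserved (every touched key is present)
lemma final_keys (l : List (String × PySem.Set String))
    (d : PySem.Dict String (PySem.Set String))
    (h : ∀ p ∈ l, PySem.Set.len p.2 = 1 → p.2.headD "" ∈ d.keys) :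
    ((l.foldl (fun d p =>
        if PySem.Set.len p.2 = 1 then
          d.modify (p.2.headD "") PySem.Set.empty (fun s => PySem.Set.add s p.1)
        else d) d).keys) = d.keys := by
  induction l generalizing d with
  | nil => simp
  | cons p l ih =>
    simp only [List.foldl_cons]
    by_cases h1 : PySem.Set.len p.2 = 1
    · rw [if_pos h1]
      have hc : d.contains (p.2.headD "") = true :=
        (PySem.Dict.contains_iff_mem_keys _ _).mpr (h p List.mem_cons_self h1)
      have hk : (d.modify (p.2.headD "") PySem.Set.empty (fun s => PySem.Set.add s p.1)).keys
          = d.keys := by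
        rw [PySem.Dict.keys_modify, PySem.Dict.keys_insert_of_contains _ _ hc]
      rw [ih _ (fun q hq hlen => by rw [hk]; exact h q (List.mem_cons_of_mem _ hq) hlen), hk]
    · rw [if_neg h1]
      exact ih _ (fun q hq hlen => h q (List.mem_cons_of_mem _ hq) hlen)

lemma mem_pvOwners (T : List (String × List (String × List String))) (t x : String) :
    x ∈ pvOwners T t ↔ ∃ c, (x, c) ∈ T ∧ t ∈ aTags c := by
  unfold pvOwners
  simp only [List.mem_map, List.mem_filter, decide_eq_true_eq]
  constructor
  · rintro ⟨⟨a', c'⟩, ⟨hmem, ht⟩, rfl⟩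
    exact ⟨c', hmem, ht⟩
  · rintro ⟨c', hmem, ht⟩
    exact ⟨(x, c'), ⟨hmem, ht⟩, rfl⟩

lemma pvOwners_nodup (T : List (String × List (String × List String))) (t : String)
    (h : (T.map Prod.fst).Nodup) : (pvOwners T t).Nodup := by
  exact ((List.filter_sublist (l := T)).map Prod.fst).nodup h

lemma length_pvOwners (T : List (String × List (String × List String))) (t : String) :
    (pvOwners T t).length = pvOcnt T t := by
  simp [pvOwners, pvOcnt, List.countP_eq_length_filter]

lemma pvOwners_singleton (T : List (String × List (String × List String)))
    (a : String) (c : List (String × List String)) (t : String)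
    (hm : (a, c) ∈ T) (ht : t ∈ aTags c) :
    pvOwners T t = [a] ↔ pvOcnt T t = 1 := by
  constructor
  · intro he
    have hl := length_pvOwners T t
    rw [he] at hl
    exact hl.symm ▸ rfl
  · intro hc
    have hlen : (pvOwners T t).length = 1 := by rw [length_pvOwners]; exact hc
    obtain ⟨x, hx⟩ := List.length_eq_one_iff.mp hlen
    have hax : a ∈ pvOwners T t := (mem_pvOwners T t a).mpr ⟨c, hm, ht⟩
    rw [hx] at hax ⊢
    simp only [List.mem_singleton] at hax
    rw [hax]

lemma ofList_filter (xs : List String) (p : String → Bool) :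
    PySem.Set.ofList (xs.filter p) = (PySem.Set.ofList xs).filter p := by
  induction xs using List.reverseRecOn with
  | nil => simp
  | append_singleton xs x ih =>
    rw [List.filter_append, PySem.Set.ofList_append_singleton]
    by_cases hp : p x
    · rw [show List.filter p [x] = [x] from by simp [hp]]
      rw [PySem.Set.ofList_append_singleton, ih]
      by_cases hx : x ∈ PySem.Set.ofList xs
      · rw [PySem.Set.add_of_mem hx]
        have hxf : x ∈ (PySem.Set.ofList xs).filter p := List.mem_filter.mpr ⟨hx, hp⟩
        rw [PySem.Set.add_of_mem hxf]
      · rw [PySem.Set.add_of_not_mem hx, List.filter_append]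
        have hxf : x ∉ (PySem.Set.ofList xs).filter p := fun hin => hx (List.mem_filter.mp hin).1
        rw [PySem.Set.add_of_not_mem hxf]
        simp [hp]
    · rw [show List.filter p [x] = [] from by simp [hp], List.append_nil, ih]
      by_cases hx : x ∈ PySem.Set.ofList xs
      · rw [PySem.Set.add_of_mem hx]
      · rw [PySem.Set.add_of_not_mem hx, List.filter_append]
        simp [hp]

lemma flatMap_filter_owned (T : List (String × List (String × List String)))
    (a : String) (c : List (String × List String))
    (hnd : (T.map Prod.fst).Nodup) (hm : (a, c) ∈ T) :
    (T.flatMap (fun ac => aTags ac.2)).filter (fun t => decide (pvOwners T t = [a]))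
      = (aTags c).filter (fun t => decide (pvOwners T t = [a])) := by
  obtain ⟨l1, l2, rfl⟩ := List.append_of_mem hm
  have hnd' := hnd
  rw [List.map_append, List.map_cons, List.nodup_append] at hnd'
  have ha1 : a ∉ l1.map Prod.fst := fun hmem => hnd'.2.2 a hmem a List.mem_cons_self rfl
  have ha2 : a ∉ l2.map Prod.fst := by
    have := hnd'.2.1
    rw [List.nodup_cons] at this
    exact this.1
  have h1 : (l1.flatMap (fun ac => aTags ac.2)).filter
      (fun t => decide (pvOwners (l1 ++ (a, c) :: l2) t = [a])) = [] := by
    rw [List.filter_eq_nil_iff]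
    intro t htm
    obtain ⟨ac', hac', ht'⟩ := List.mem_flatMap.mp htm
    simp only [decide_eq_true_eq]
    intro heq
    have hxin : ac'.1 ∈ pvOwners (l1 ++ (a, c) :: l2) t :=
      (mem_pvOwners _ t ac'.1).mpr ⟨ac'.2, by rw [Prod.mk.eta]; exact List.mem_append_left _ hac', ht'⟩
    rw [heq, List.mem_singleton] at hxin
    exact ha1 (List.mem_map.mpr ⟨ac', hac', hxin⟩)
  have h2 : (l2.flatMap (fun ac => aTags ac.2)).filter
      (fun t => decide (pvOwners (l1 ++ (a, c) :: l2) t = [a])) = [] := by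
    rw [List.filter_eq_nil_iff]
    intro t htm
    obtain ⟨ac', hac', ht'⟩ := List.mem_flatMap.mp htm
    simp only [decide_eq_true_eq]
    intro heq
    have hxin : ac'.1 ∈ pvOwners (l1 ++ (a, c) :: l2) t :=
      (mem_pvOwners _ t ac'.1).mpr ⟨ac'.2, by
        rw [Prod.mk.eta]
        exact List.mem_append_right _ (List.mem_cons_of_mem _ hac'), ht'⟩
    rw [heq, List.mem_singleton] at hxin
    exact ha2 (List.mem_map.mpr ⟨ac', hac', hxin⟩)
  rw [List.flatMap_append, List.flatMap_cons, List.filter_append, List.filter_append, h1, h2]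
  simp

lemma alt_char (T : List (String × List (String × List String)))
    (_hnd : (T.map Prod.fst).Nodup) :
    taxonomy_lane_keywords_alt T
      = T.map (fun ac => (ac.1, PySem.Set.ofList
          ((aTags ac.2).filter (fun t => decide (pvOwners T t = [ac.1]))))) := by
  unfold taxonomy_lane_keywords_alt
  simp only [bTags_eq]
  apply List.map_congr_left
  intro ac hac
  have hac' : (ac.1, ac.2) ∈ T := by rw [Prod.mk.eta]; exact hac
  congr 1
  rw [foldl_if_add, PySem.Set.update_empty]
  congr 1
  apply List.filter_congr
  intro t ht
  have hc := counts_outer T PySem.Dict.empty t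
  rw [PySem.Dict.getD_empty] at hc
  simp only [bTags_eq] at hc
  apply decide_eq_decide.mpr
  rw [hc]
  have hiff : (0 + (pvOcnt T t : Int) = 1) ↔ pvOcnt T t = 1 := by omega
  rw [hiff, ← pvOwners_singleton T ac.1 ac.2 t hac' ht]

lemma a_char (T : List (String × List (String × List String)))
    (hnd : (T.map Prod.fst).Nodup) :
    taxonomy_lane_keywords T
      = T.map (fun ac => (ac.1, PySem.Set.ofList
          ((T.flatMap (fun ac' => aTags ac'.2)).filter
            (fun t => decide (pvOwners T t = [ac.1]))))) := by
  unfold taxonomy_lane_keywords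
  simp only []
  -- characterise tag_owners
  have hkeys : ((T.foldl (fun d ac => (aTags ac.2).foldl
        (fun d tag => d.modify tag PySem.Set.empty (fun s => PySem.Set.add s ac.1)) d)
        PySem.Dict.empty).keys)
      = PySem.Set.ofList (T.flatMap (fun ac => aTags ac.2)) := by
    rw [owners_keys, PySem.Dict.keys_empty, PySem.Set.update_nil_left]
  have hknd : ((T.foldl (fun d ac => (aTags ac.2).foldl
        (fun d tag => d.modify tag PySem.Set.empty (fun s => PySem.Set.add s ac.1)) d)
        PySem.Dict.empty).keys).Nodup := by
    rw [hkeys]; exact PySem.Set.nodup_ofList _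
  have hitems : ((T.foldl (fun d ac => (aTags ac.2).foldl
        (fun d tag => d.modify tag PySem.Set.empty (fun s => PySem.Set.add s ac.1)) d)
        PySem.Dict.empty).items)
      = (PySem.Set.ofList (T.flatMap (fun ac => aTags ac.2))).map
          (fun t => (t, pvOwners T t)) := by
    rw [PySem.Dict.items_eq_map_keys _ hknd PySem.Set.empty, hkeys]
    apply List.map_congr_left
    intro t htK
    rw [owners_outer, PySem.Dict.getD_empty, PySem.Set.update_empty,
      PySem.Set.ofList_eq_self_of_nodup _ (pvOwners_nodup T t hnd)]
  rw [hitems]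
  have hk0 : ((T.foldl (fun d ac => d.insert ac.1 PySem.Set.empty) PySem.Dict.empty
        : PySem.Dict String (PySem.Set String)).keys) = T.map Prod.fst := by
    rw [excl0_keys, PySem.Set.ofList_eq_self_of_nodup _ hnd]
  have hyp : ∀ p ∈ (PySem.Set.ofList (T.flatMap (fun ac => aTags ac.2))).map
        (fun t => (t, pvOwners T t)),
      PySem.Set.len p.2 = 1 →
        p.2.headD "" ∈ ((T.foldl (fun d ac => d.insert ac.1 PySem.Set.empty) PySem.Dict.empty
          : PySem.Dict String (PySem.Set String)).keys) := by
    intro p hp hlen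
    obtain ⟨t, htK, rfl⟩ := List.mem_map.mp hp
    have hl1 : (pvOwners T t).length = 1 := by
      unfold PySem.Set.len at hlen
      exact_mod_cast hlen
    obtain ⟨x, hx⟩ := List.length_eq_one_iff.mp hl1
    rw [hk0, hx]
    simp only [List.headD_cons]
    have hxm : x ∈ pvOwners T t := by rw [hx]; exact List.mem_singleton.mpr rfl
    obtain ⟨c', hc', _⟩ := (mem_pvOwners T t x).mp hxm
    exact List.mem_map.mpr ⟨(x, c'), hc', rfl⟩
  have hfk := final_keys _ _ hyp
  have hfknd : (((PySem.Set.ofList (T.flatMap (fun ac => aTags ac.2))).map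
        (fun t => (t, pvOwners T t))).foldl (fun d p =>
        if PySem.Set.len p.2 = 1 then
          d.modify (p.2.headD "") PySem.Set.empty (fun s => PySem.Set.add s p.1)
        else d)
        (T.foldl (fun d ac => d.insert ac.1 PySem.Set.empty) PySem.Dict.empty)).keys.Nodup := by
    rw [hfk, hk0]; exact hnd
  rw [PySem.Dict.items_eq_map_keys _ hfknd PySem.Set.empty, hfk, hk0, List.map_map]
  apply List.map_congr_left
  intro ac hac
  simp only [Function.comp_apply]
  congr 1
  rw [final_getD, excl0_getD T PySem.Dict.empty ac.1 (PySem.Dict.getD_empty _ _),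
    PySem.Set.update_empty]
  have hfmap : ((PySem.Set.ofList (T.flatMap (fun ac' => aTags ac'.2))).map
        (fun t => (t, pvOwners T t))).filter
        (fun p => decide (PySem.Set.len p.2 = 1 ∧ p.2.headD "" = ac.1))
      = ((PySem.Set.ofList (T.flatMap (fun ac' => aTags ac'.2))).filter
          (fun t => decide (pvOwners T t = [ac.1]))).map (fun t => (t, pvOwners T t)) := by
    rw [List.filter_map]
    congr 1
    apply List.filter_congr
    intro t htK
    simp only [Function.comp_apply]
    apply decide_eq_decide.mpr
    constructor
    · rintro ⟨hlen, hhd⟩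
      have hl1 : (pvOwners T t).length = 1 := by
        unfold PySem.Set.len at hlen
        exact_mod_cast hlen
      obtain ⟨x, hx⟩ := List.length_eq_one_iff.mp hl1
      rw [hx] at hhd ⊢
      simp only [List.headD_cons] at hhd
      rw [hhd]
    · intro he
      rw [he]
      exact ⟨rfl, rfl⟩
  rw [hfmap, List.map_map]
  have : (Prod.fst ∘ fun t => (t, pvOwners T t)) = id := rfl
  rw [this, List.map_id]
  rw [← ofList_filter, PySem.Set.ofList_ofList]

-- ===== VERDICT (by name: the statement is the Claim_ definition above) =====
theorem taxonomy_lane_keywords_spec : Claim_equal_taxonomy_lane_keywords := by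
  intro T _hdom hpre
  unfold Spec_taxonomy_lane_keywords
  rw [a_char T hpre, alt_char T hpre]
  apply List.map_congr_left
  intro ac hac
  congr 1
  rw [flatMap_filter_owned T ac.1 ac.2 hpre (by rw [Prod.mk.eta]; exact hac)]
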